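-- pv_equiv track=rewrite | github.com/hazem31/security | ass1/assignment_3.py | split_to_mat
-- ===== SOURCE A (Python) =====
-- def split_to_mat(s):
--     temp1 = []
--     temp2 = []
--     temp3 = []
--     temp4 = []
--     temp = []
--     for i in range(0,len(s),8):
--         temp1.append(s[i:i+2])
--     temp.append(temp1)
--     for i in range(2,len(s),8):
--         temp2.append(s[i:i+2])
--     temp.append(temp2)
--     for i in range(4,len(s),8):
--         temp3.append(s[i:i+2])
--     temp.append(temp3)
--     for i in range(6,len(s),8):
--         temp4.append(s[i:i+2])
--     temp.append(temp4)
--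
--     return temp
-- ===== SOURCE B (Python) =====
-- def split_to_mat(s):
--     chunks = [s[i:i + 2] for i in range(0, len(s), 2)]
--     return [chunks[r::4] for r in range(4)]
-- ===== Notes on version B (the rewrite author's own statement) =====
-- stated objective: simpler
-- what changed: B builds the flat list of 2-char chunks in one left-to-right pass and reshapes it into the four rows by strided slicing chunks[r::4], instead of A's four separate strided scans of the string with hand-maintained row lists.
import Mathlib
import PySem

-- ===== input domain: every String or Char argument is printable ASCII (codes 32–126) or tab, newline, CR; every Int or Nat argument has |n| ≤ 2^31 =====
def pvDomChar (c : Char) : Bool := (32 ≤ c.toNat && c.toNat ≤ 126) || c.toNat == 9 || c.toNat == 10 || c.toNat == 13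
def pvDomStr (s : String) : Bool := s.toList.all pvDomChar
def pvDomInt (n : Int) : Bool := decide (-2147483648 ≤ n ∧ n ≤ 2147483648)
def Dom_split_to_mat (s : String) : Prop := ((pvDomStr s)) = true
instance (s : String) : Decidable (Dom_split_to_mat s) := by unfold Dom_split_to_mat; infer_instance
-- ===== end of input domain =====

-- B builds the flat list of 2-char chunks in one pass and reshapes it into the four
-- rows by strided selection, instead of A's four separate strided scans of the string.

-- ===== PORT A =====
def split_to_mat (s : String) : List (List String) :=
  let temp1 := (PySem.List.pyRange 0 (PySem.Str.len s) 8).foldl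
    (fun acc i => acc ++ [PySem.Str.slice s (some i) (some (i + 2))]) []
  let temp2 := (PySem.List.pyRange 2 (PySem.Str.len s) 8).foldl
    (fun acc i => acc ++ [PySem.Str.slice s (some i) (some (i + 2))]) []
  let temp3 := (PySem.List.pyRange 4 (PySem.Str.len s) 8).foldl
    (fun acc i => acc ++ [PySem.Str.slice s (some i) (some (i + 2))]) []
  let temp4 := (PySem.List.pyRange 6 (PySem.Str.len s) 8).foldl
    (fun acc i => acc ++ [PySem.Str.slice s (some i) (some (i + 2))]) []
  ([] : List (List String)) ++ [temp1] ++ [temp2] ++ [temp3] ++ [temp4]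

-- ===== PORT B =====
def split_to_mat_alt (s : String) : List (List String) :=
  let chunks := (PySem.List.pyRange 0 (PySem.Str.len s) 2).map
    (fun i => PySem.Str.slice s (some i) (some (i + 2)))
  (PySem.List.pyRange 0 4 1).map
    (fun r => (PySem.List.slice? chunks (some r) none 4).getD [])

-- ===== PRECONDITION & SPEC =====
def Spec_split_to_mat (s : String) (out : List (List String)) : Prop := out = split_to_mat_alt s
instance (s : String) (out : List (List String)) : Decidable (Spec_split_to_mat s out) := by unfold Spec_split_to_mat; infer_instance

-- ===== CLAIM (what is proved, stated in full; the proofs are below) =====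
def Claim_equal_split_to_mat : Prop := ∀ (s : String), Dom_split_to_mat s → Spec_split_to_mat s (split_to_mat s)

-- ===== LEMMAS AND PROOFS =====

-- one row of B's reshape = one of A's strided scans (r = 0,1,2,3)
theorem pv_row_eq (s : String) (r : Nat) (hr : r ≤ 3) :
    (PySem.List.slice?
        ((PySem.List.pyRange 0 (PySem.Str.len s) 2).map
          (fun i => PySem.Str.slice s (some i) (some (i + 2))))
        (some (r : Int)) none 4).getD []
      = (PySem.List.pyRange (2 * (r : Int)) (PySem.Str.len s) 8).map
          (fun i => PySem.Str.slice s (some i) (some (i + 2))) := by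
  rw [PySem.Str.len_eq]
  set n := s.toList.length with hn
  rw [PySem.List.pyRange_of_pos 0 (n:Int) (by norm_num : (0:Int) < (2:Int))]
  rw [PySem.List.pyRange_of_pos (2*(r:Int)) (n:Int) (by norm_num : (0:Int) < (8:Int))]
  rw [List.map_map, List.map_map]
  simp only [PySem.List.slice?, PySem.List.sliceIndices]
  norm_num
  have hcnt : (if 0 < n then (((n:Int) + 2 - 1) / 2).toNat else 0) = (n+1)/2 := by
    split_ifs <;> omega
  have hcI : (if 0 < n then max (((n:Int) + 2 - 1) / 2) 0 else 0) = (((n+1)/2 : ℕ) : Int) := by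
    split_ifs <;> omega
  rw [hcnt, hcI]
  have hr0 : ¬((r:Int) < 0) := by omega
  simp only [if_neg hr0]
  set c := (n+1)/2 with hc
  by_cases hrc : r < c
  · have hmin : min (r:Int) (c:Int) = (r:Int) := by omega
    rw [hmin]
    have h2rn : 2 * (r:Int) < (n:Int) := by omega
    have hcount : (if (r:Int) < (c:Int) then (((c:Int) - (r:Int) + 4 - 1) / 4).toNat else 0)
        = (if 2 * (r:Int) < (n:Int) then (((n:Int) - 2 * (r:Int) + 8 - 1) / 8).toNat else 0) := by
      rw [if_pos (by omega : (r:Int) < (c:Int)), if_pos h2rn]; omega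
    rw [hcount]
    set m := (if 2 * (r:Int) < (n:Int) then (((n:Int) - 2 * (r:Int) + 8 - 1) / 8).toNat else 0) with hm
    have hmval : m = ((n:Int) - 2 * (r:Int) + 7).toNat / 8 := by rw [hm, if_pos h2rn]; omega
    have hpt : ∀ x ∈ List.range m,
        (Option.map ((fun i => PySem.Str.slice s (some i) (some (i + 2))) ∘ fun k : ℕ => 2 * (k:Int))
          (List.range c)[((r:Int) + 4 * (x:Int)).toNat]?)
        = some (((fun i => PySem.Str.slice s (some i) (some (i + 2))) ∘ fun k : ℕ => 2 * (r:Int) + 8 * (k:Int)) x) := by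
      intro x hx
      rw [List.mem_range] at hx
      have hidx : ((r:Int) + 4 * (x:Int)).toNat = r + 4 * x := by omega
      have hlt : r + 4 * x < c := by omega
      rw [hidx, List.getElem?_range hlt]
      simp only [Option.map_some, Function.comp_apply]
      have harg : (2 * ((r + 4 * x : ℕ) : Int)) = 2 * (r:Int) + 8 * (x:Int) := by push_cast; ring
      rw [harg]
    rw [List.filterMap_congr hpt]
    simp
  · have hmin : min (r:Int) (c:Int) = (c:Int) := by omega
    rw [hmin]
    have : ¬(2 * (r:Int) < (n:Int)) := by omega
    simp [this]

-- ===== VERDICT (by name: the statement is the Claim_ definition above) =====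
theorem split_to_mat_spec : Claim_equal_split_to_mat := by
  intro s _
  unfold Spec_split_to_mat split_to_mat split_to_mat_alt
  simp only [PySem.List.foldl_append_singleton_eq_map, List.nil_append]
  have h4 : PySem.List.pyRange 0 4 1 = [0, 1, 2, 3] := by decide
  rw [h4]
  simp only [List.map_cons, List.map_nil]
  have e0 := pv_row_eq s 0 (by omega)
  have e1 := pv_row_eq s 1 (by omega)
  have e2 := pv_row_eq s 2 (by omega)
  have e3 := pv_row_eq s 3 (by omega)
  norm_num at e0 e1 e2 e3
  norm_num [PySem.Str.len_eq]
  rw [e0, e1, e2, e3]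
  exact ⟨rfl, rfl, rfl, rfl⟩
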